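-- pv_equiv track=rewrite | github.com/isabellafagioli/MC102---Algoritmos-e-Programacao-de-Computadores | tarefa11/frequencia.py | organizar_frequencia
-- ===== SOURCE A (Python) =====
-- def organizar_frequencia(lista):
--  lista = sorted(lista)
--  P = []
--  lista2 = []
--  for item in lista:
--      if item not in lista2:
--          lista2.append(item)
--  c = 0
--  while c < len(lista2):
--      valor = lista2[c]
--      p = lista.count(valor)
--      P.append(p)
--      c+=1
--  j = 0
--  n = len(lista2)
--  for a in range(n - 1):
--      for j in range(n-a-1):
--          if P[j] < P[j+1] :
--              P[j], P[j+1] = P[j+1], P[j]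
--              lista2[j], lista2[j+1] = lista2[j+1], lista2[j]
--  return lista2, P
-- ===== SOURCE B (Python) =====
-- def organizar_frequencia(lista):
--     counts = {}
--     for x in sorted(lista):
--         counts[x] = counts.get(x, 0) + 1
--     valores = sorted(counts, key=lambda v: -counts[v])
--     return valores, [counts[v] for v in valores]
-- ===== Notes on version B (the rewrite author's own statement) =====
-- stated objective: faster
-- what changed: Replaces the scan-based dedup, the per-value lista.count inner scan and the hand-written bubble sort by a single counting dict built over sorted(lista) plus one stable library sort keyed on -count.
import Mathlib
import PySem

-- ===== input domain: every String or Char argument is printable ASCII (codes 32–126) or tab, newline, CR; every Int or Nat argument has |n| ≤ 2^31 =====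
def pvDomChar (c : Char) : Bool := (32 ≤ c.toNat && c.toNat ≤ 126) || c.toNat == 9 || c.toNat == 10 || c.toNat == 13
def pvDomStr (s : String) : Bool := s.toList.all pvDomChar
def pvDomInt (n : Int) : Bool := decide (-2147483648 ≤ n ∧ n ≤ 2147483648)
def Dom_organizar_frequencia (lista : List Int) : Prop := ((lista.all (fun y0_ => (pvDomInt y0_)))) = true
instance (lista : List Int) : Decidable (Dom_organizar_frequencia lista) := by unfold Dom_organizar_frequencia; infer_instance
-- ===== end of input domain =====

-- B replaces A's scan-based dedup, per-value count scan and hand-written bubble sort by one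
-- counting dict over sorted(lista) plus a single stable library sort keyed on -count (faster algorithm).

-- ===== PORT A =====
def organizar_frequencia (lista : List Int) : List Int × List Int :=
  -- lista = sorted(lista)
  let lista := PySem.List.sorted lista (fun x => x) false
  -- P = []; lista2 = []; for item in lista: if item not in lista2: lista2.append(item)
  let P : List Int := []
  let lista2 : List Int := lista.foldl (fun l2 item => if item ∈ l2 then l2 else l2 ++ [item]) []
  -- c = 0; while c < len(lista2): valor = lista2[c]; p = lista.count(valor); P.append(p); c += 1
  let P := (PySem.List.pyRange 0 (PySem.List.len lista2) 1).foldl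
      (fun P c => P ++ [((PySem.List.count lista (PySem.List.pyGetD lista2 c 0)) : Int)]) P
  let n : Int := PySem.List.len lista2
  -- nested bubble passes; all indices are provably in range, so pyGetD/pySetD are exact here
  let st := (PySem.List.pyRange 0 (n - 1) 1).foldl (fun st a =>
      (PySem.List.pyRange 0 (n - a - 1) 1).foldl (fun st j =>
        let l2 := st.1; let P := st.2
        if PySem.List.pyGetD P j 0 < PySem.List.pyGetD P (j + 1) 0 then
          (PySem.List.pySetD (PySem.List.pySetD l2 j (PySem.List.pyGetD l2 (j+1) 0)) (j+1) (PySem.List.pyGetD l2 j 0),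
           PySem.List.pySetD (PySem.List.pySetD P j (PySem.List.pyGetD P (j+1) 0)) (j+1) (PySem.List.pyGetD P j 0))
        else st) st) (lista2, P)
  st

-- ===== PORT B =====
def organizar_frequencia_alt (lista : List Int) : List Int × List Int :=
  -- counts = {}; for x in sorted(lista): counts[x] = counts.get(x, 0) + 1
  let counts : PySem.Dict Int Int := (PySem.List.sorted lista (fun x => x) false).foldl
      (fun d x => d.insert x (d.getD x 0 + 1)) PySem.Dict.empty
  -- valores = sorted(counts, key=lambda v: -counts[v])
  let valores := PySem.List.sorted counts.keys (fun v => -(counts.getD v 0)) false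
  -- counts[v]: v is always a key of counts, so the lookup cannot raise; getD is exact here
  (valores, valores.map (fun v => counts.getD v 0))

-- ===== PRECONDITION & SPEC =====
def Spec_organizar_frequencia (lista : List Int) (out : List Int × List Int) : Prop := out = organizar_frequencia_alt lista
instance (lista : List Int) (out : List Int × List Int) : Decidable (Spec_organizar_frequencia lista out) := by unfold Spec_organizar_frequencia; infer_instance

-- ===== CLAIM (what is proved, stated in full; the proofs are below) =====
def Claim_equal_organizar_frequencia : Prop := ∀ (lista : List Int), Dom_organizar_frequencia lista → Spec_organizar_frequencia lista (organizar_frequencia lista)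

-- ===== LEMMAS AND PROOFS =====

def bpass : Nat → List (Int × Int) → List (Int × Int)
  | 0, Z => Z
  | _ + 1, [] => []
  | _ + 1, [x] => [x]
  | k + 1, x :: y :: t => if x.2 < y.2 then y :: bpass k (x :: t) else x :: bpass k (y :: t)

def step2 (st : List Int × List Int) (j : Nat) : List Int × List Int :=
  if st.2.getD j 0 < st.2.getD (j + 1) 0 then
    ((st.1.set j (st.1.getD (j+1) 0)).set (j+1) (st.1.getD j 0),
     (st.2.set j (st.2.getD (j+1) 0)).set (j+1) (st.2.getD j 0))
  else st

def mstate (Z : List (Int × Int)) : List Int × List Int := (Z.map Prod.fst, Z.map Prod.snd)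

def bubOuter (n : Nat) : Nat → Nat → List (Int × Int) → List (Int × Int)
  | 0, _, Z => Z
  | c + 1, s, Z => bubOuter n c (s + 1) (bpass (n - s - 1) Z)

def innerBody (st : List Int × List Int) (j : Int) : List Int × List Int :=
  if PySem.List.pyGetD st.2 j 0 < PySem.List.pyGetD st.2 (j + 1) 0 then
    (PySem.List.pySetD (PySem.List.pySetD st.1 j (PySem.List.pyGetD st.1 (j+1) 0)) (j+1) (PySem.List.pyGetD st.1 j 0),
     PySem.List.pySetD (PySem.List.pySetD st.2 j (PySem.List.pyGetD st.2 (j+1) 0)) (j+1) (PySem.List.pyGetD st.2 j 0))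
  else st

theorem bpass_perm (k : Nat) (Z : List (Int × Int)) : (bpass k Z).Perm Z := by
  induction k generalizing Z with
  | zero => simp [bpass]
  | succ k ih =>
    match Z with
    | [] => simp [bpass]
    | [x] => simp [bpass]
    | x :: y :: t =>
      simp only [bpass]
      split
      · exact ((ih (x :: t)).cons y).trans (List.Perm.swap x y t)
      · exact (ih (y :: t)).cons x

theorem bpass_filter (k : Nat) (Z : List (Int × Int)) (c : Int) :
    (bpass k Z).filter (fun p => p.2 == c) = Z.filter (fun p => p.2 == c) := by
  induction k generalizing Z with
  | zero => simp [bpass]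
  | succ k ih =>
    match Z with
    | [] => simp [bpass]
    | [x] => simp [bpass]
    | x :: y :: t =>
      simp only [bpass]
      split
      · rename_i hlt
        rw [List.filter_cons, List.filter_cons, List.filter_cons, ih (x :: t), List.filter_cons]
        by_cases hx : x.2 = c
        · have hy : ¬ y.2 = c := by omega
          simp [hx, hy]
        · by_cases hy : y.2 = c
          · simp [hx, hy]
          · simp [hx, hy]
      · rw [List.filter_cons, List.filter_cons, ih (y :: t)]

theorem bpass_decomp (k : Nat) (Z : List (Int × Int)) (hk : k < Z.length) :
    ∃ E w, bpass k Z = E ++ w :: Z.drop (k + 1) ∧ E.length = k ∧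
      ∀ p ∈ Z.take (k + 1), w.2 ≤ p.2 := by
  induction k generalizing Z with
  | zero =>
    match Z with
    | z :: t => exact ⟨[], z, by simp [bpass], rfl, by simp⟩
  | succ k ih =>
    match Z with
    | [] => simp at hk
    | [x] => simp at hk
    | x :: y :: t =>
      simp only [bpass]
      split
      · rename_i hlt
        obtain ⟨E, w, he, hl, hmin⟩ := ih (x :: t) (by simp at hk ⊢; omega)
        refine ⟨y :: E, w, by simp [he], by simp [hl], ?_⟩
        intro q hq
        simp only [List.take_succ_cons, List.mem_cons] at hq
        rcases hq with h | h | h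
        · subst h; exact hmin q (by simp [List.take_succ_cons])
        · subst h; have := hmin x (by simp [List.take_succ_cons]); omega
        · exact hmin q (by simp [List.take_succ_cons, h])
      · rename_i hlt
        obtain ⟨E, w, he, hl, hmin⟩ := ih (y :: t) (by simp at hk ⊢; omega)
        refine ⟨x :: E, w, by simp [he], by simp [hl], ?_⟩
        intro q hq
        simp only [List.take_succ_cons, List.mem_cons] at hq
        rcases hq with h | h | h
        · subst h; have := hmin y (by simp [List.take_succ_cons]); omega
        · subst h; exact hmin q (by simp [List.take_succ_cons])
        · exact hmin q (by simp [List.take_succ_cons, h])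

theorem step2_cons (a b : Int) (u v : List Int) (j : Nat) :
    step2 (a :: u, b :: v) (j + 1) = (a :: (step2 (u, v) j).1, b :: (step2 (u, v) j).2) := by
  simp only [step2, List.getD_cons_succ, List.set_cons_succ]
  split <;> rfl

theorem step2_shift (js : List Nat) (a b : Int) (u v : List Int) :
    (js.map (· + 1)).foldl step2 (a :: u, b :: v) =
      (a :: (js.foldl step2 (u, v)).1, b :: (js.foldl step2 (u, v)).2) := by
  induction js generalizing u v with
  | nil => simp
  | cons j js ih =>
    simp only [List.map_cons, List.foldl_cons, step2_cons]
    rw [ih]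

theorem inner_nat_eq (m : Nat) (Z : List (Int × Int)) (hm : m < Z.length) :
    (List.range m).foldl step2 (mstate Z) = mstate (bpass m Z) := by
  induction m generalizing Z with
  | zero => simp [bpass]
  | succ m ih =>
    match Z with
    | [] => simp at hm
    | [x] => simp at hm
    | x :: y :: t =>
      rw [List.range_succ_eq_map, List.foldl_cons]
      have h0 : step2 (mstate (x :: y :: t)) 0 =
          mstate ((if x.2 < y.2 then y :: x :: t else x :: y :: t)) := by
        simp only [mstate, step2, List.map_cons, List.getD_cons_zero, List.getD_cons_succ]
        split <;> simp [List.set]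
      rw [h0]
      simp only [bpass]
      split
      · rename_i hlt
        have : mstate (y :: x :: t) = (y.1 :: (mstate (x :: t)).1, y.2 :: (mstate (x :: t)).2) := rfl
        rw [this, step2_shift, ih (x :: t) (by simp at hm ⊢; omega)]
        rfl
      · rename_i hlt
        have : mstate (x :: y :: t) = (x.1 :: (mstate (y :: t)).1, x.2 :: (mstate (y :: t)).2) := rfl
        rw [this, step2_shift, ih (y :: t) (by simp at hm ⊢; omega)]
        rfl

theorem bubOuter_perm (n : Nat) (c s : Nat) (Z : List (Int × Int)) :
    (bubOuter n c s Z).Perm Z := by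
  induction c generalizing s Z with
  | zero => simp [bubOuter]
  | succ c ih => exact (ih (s+1) _).trans (bpass_perm _ _)

theorem bubOuter_filter (n : Nat) (c s : Nat) (Z : List (Int × Int)) (cl : Int) :
    (bubOuter n c s Z).filter (fun p => p.2 == cl) = Z.filter (fun p => p.2 == cl) := by
  induction c generalizing s Z with
  | zero => simp [bubOuter]
  | succ c ih => rw [bubOuter, ih, bpass_filter]

theorem bubOuter_pairwise (n : Nat) : ∀ (c s : Nat) (Z : List (Int × Int)),
    Z.length = n → s + c = n - 1 →
    (∃ pre suf, Z = pre ++ suf ∧ suf.length = s ∧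
      suf.Pairwise (fun p q => q.2 ≤ p.2) ∧ ∀ p ∈ pre, ∀ q ∈ suf, q.2 ≤ p.2) →
    (bubOuter n c s Z).Pairwise (fun p q => q.2 ≤ p.2) := by
  intro c
  induction c with
  | zero =>
    intro s Z hlen hs ⟨pre, suf, hZ, hsuf, hpw, hge⟩
    have hpre : pre.length ≤ 1 := by
      have := congrArg List.length hZ
      simp at this; omega
    rw [bubOuter, hZ]
    match pre, hpre with
    | [], _ => simpa using hpw
    | [p], _ =>
      simp only [List.singleton_append, List.pairwise_cons]
      exact ⟨fun q hq => hge p (by simp) q hq, hpw⟩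
  | succ c ih =>
    intro s Z hlen hs ⟨pre, suf, hZ, hsuf, hpw, hge⟩
    have hn2 : 2 ≤ n := by omega
    have hprelen : pre.length = n - s := by
      have := congrArg List.length hZ; simp at this; omega
    have hm : n - s - 1 < Z.length := by omega
    obtain ⟨E, w, he, hl, hmin⟩ := bpass_decomp (n - s - 1) Z hm
    have hplen : n - s - 1 + 1 = pre.length := by omega
    have hdrop : Z.drop (n - s - 1 + 1) = suf := by
      rw [hZ, List.drop_append, hplen]
      simp
    have htake : Z.take (n - s - 1 + 1) = pre := by
      rw [hZ, List.take_append, hplen]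
      simp
    rw [bubOuter]
    apply ih (s+1) _ (by rw [(bpass_perm _ _).length_eq]; exact hlen) (by omega)
    refine ⟨E, w :: suf, by rw [he, hdrop], by simp [hsuf], ?_, ?_⟩
    · -- Pairwise on w :: suf
      have hwpre : w ∈ pre := by
        have hperm : ((E ++ [w]) ++ suf).Perm (pre ++ suf) := by
          have := bpass_perm (n - s - 1) Z
          rw [he, hdrop] at this
          simpa [hZ] using this
        have : (E ++ [w]).Perm pre := ((List.perm_append_right_iff suf).mp hperm)
        exact this.mem_iff.mp (by simp)
      exact List.pairwise_cons.mpr ⟨fun q hq => hge w hwpre q hq, hpw⟩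
    · -- ∀ p ∈ E, ∀ q ∈ w :: suf
      have hperm : (E ++ [w]).Perm pre := by
        have hperm : ((E ++ [w]) ++ suf).Perm (pre ++ suf) := by
          have := bpass_perm (n - s - 1) Z
          rw [he, hdrop] at this
          simpa [hZ] using this
        exact (List.perm_append_right_iff suf).mp hperm
      intro p hp q hq
      have hppre : p ∈ pre := hperm.mem_iff.mp (by simp [hp])
      rcases List.mem_cons.mp hq with h | h
      · subst h; exact hmin p (by rw [htake]; exact hppre)
      · exact hge p hppre q h

theorem pairwise_insertBy (key : Int → Int) (x : Int) (acc : List Int)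
    (h : acc.Pairwise (fun a b => key a ≤ key b)) :
    (PySem.List.insertBy (fun a b => decide (key a < key b)) x acc).Pairwise
      (fun a b => key a ≤ key b) := by
  induction acc with
  | nil => simp [PySem.List.insertBy]
  | cons y ys ih =>
    rw [List.pairwise_cons] at h
    obtain ⟨hy, hys⟩ := h
    simp only [PySem.List.insertBy]
    split
    · rename_i hlt
      simp only [decide_eq_true_eq] at hlt
      refine List.pairwise_cons.mpr ⟨?_, List.pairwise_cons.mpr ⟨hy, hys⟩⟩
      intro z hz
      rcases List.mem_cons.mp hz with h | h
      · subst h; omega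
      · have := hy z h; omega
    · rename_i hlt
      simp only [decide_eq_true_eq] at hlt
      refine List.pairwise_cons.mpr ⟨?_, ih hys⟩
      intro z hz
      rcases (PySem.List.mem_insertBy _ _ _ _).mp hz with h | h
      · subst h; omega
      · exact hy z h

theorem filter_insertBy (key : Int → Int) (c : Int) (x : Int) (acc : List Int)
    (h : acc.Pairwise (fun a b => key a ≤ key b)) :
    (PySem.List.insertBy (fun a b => decide (key a < key b)) x acc).filter (fun z => key z == c)
      = acc.filter (fun z => key z == c) ++ (if key x == c then [x] else []) := by
  induction acc with
  | nil => simp [PySem.List.insertBy, List.filter_cons]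
  | cons y ys ih =>
    rw [List.pairwise_cons] at h
    obtain ⟨hy, hys⟩ := h
    simp only [PySem.List.insertBy]
    split
    · rename_i hlt
      simp only [decide_eq_true_eq] at hlt
      by_cases hx : key x = c
      · have hnil : (y :: ys).filter (fun z => key z == c) = [] := by
          rw [List.filter_eq_nil_iff]
          intro z hz
          rcases List.mem_cons.mp hz with h | h
          · subst h; simp; omega
          · have := hy z h; simp; omega
        rw [List.filter_cons_of_pos (by simp [hx]), hnil]
        simp [hx]
      · rw [List.filter_cons_of_neg (by simp [hx]), if_neg (by simp [hx]), List.append_nil]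
    · rw [List.filter_cons, List.filter_cons, ih hys]
      split <;> simp
theorem sorted_filter_go (key : Int → Int) (c : Int) : ∀ (xs acc : List Int),
    acc.Pairwise (fun a b => key a ≤ key b) →
    (xs.foldl (fun acc x => PySem.List.insertBy (fun a b => decide (key a < key b)) x acc) acc).filter
        (fun z => key z == c)
      = acc.filter (fun z => key z == c) ++ xs.filter (fun z => key z == c) := by
  intro xs
  induction xs with
  | nil => simp
  | cons x xs ih =>
    intro acc hacc
    rw [List.foldl_cons, ih _ (pairwise_insertBy key x acc hacc), filter_insertBy key c x acc hacc,
      List.filter_cons]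
    split <;> simp

theorem sorted_filter (key : Int → Int) (c : Int) (xs : List Int) :
    (PySem.List.sorted xs key false).filter (fun z => key z == c)
      = xs.filter (fun z => key z == c) := by
  rw [PySem.List.sorted_eq_foldl_insertBy, sorted_filter_go key c xs [] (by simp)]
  simp

theorem uniq_sorted (f : Int → Int) : ∀ (l₁ l₂ : List Int), l₁.Perm l₂ →
    l₁.Pairwise (fun a b => f a ≤ f b) → l₂.Pairwise (fun a b => f a ≤ f b) →
    (∀ c, l₁.filter (fun x => f x == c) = l₂.filter (fun x => f x == c)) → l₁ = l₂ := by
  intro l₁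
  induction l₁ with
  | nil => intro l₂ hp _ _ _; exact (hp.nil_eq).symm ▸ rfl
  | cons x t₁ ih =>
    intro l₂ hp h₁ h₂ hf
    match l₂ with
    | [] => exact absurd hp.symm.nil_eq (by simp)
    | y :: t₂ =>
      rw [List.pairwise_cons] at h₁ h₂
      have hxy : f x = f y := by
        have hx : x ∈ y :: t₂ := hp.mem_iff.mp (by simp)
        have hy : y ∈ x :: t₁ := hp.mem_iff.mpr (by simp)
        rcases List.mem_cons.mp hx with h | h
        · rw [h]
        · have h1 := h₂.1 x h
          rcases List.mem_cons.mp hy with h' | h'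
          · rw [h']
          · have h2 := h₁.1 y h'
            omega
      have hfx := hf (f x)
      rw [List.filter_cons_of_pos (by simp), List.filter_cons_of_pos (by simp [hxy])] at hfx
      have hxy2 : x = y := by injection hfx
      subst hxy2
      have hperm : t₁.Perm t₂ := hp.cons_inv
      have ht : t₁ = t₂ := by
        apply ih t₂ hperm h₁.2 h₂.2
        intro c
        by_cases hc : f x = c
        · subst hc; injection hfx
        · have := hf c
          rw [List.filter_cons_of_neg (by simp [hc]), List.filter_cons_of_neg (by simp [hc])] at this
          exact this
      rw [ht]

theorem step_eq (st : List Int × List Int) (k : Nat) : innerBody st ((0:Int) + (k:Int)) = step2 st k := by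
  have hk1 : (k:Int) + 1 = ((k+1 : Nat) : Int) := by push_cast; ring
  simp only [innerBody, step2, zero_add, hk1, PySem.List.pyGetD_natCast, PySem.List.pySetD_natCast]

theorem inner_fold_eq (M : Int) (st : List Int × List Int) :
    (PySem.List.pyRange 0 M 1).foldl innerBody st = (List.range M.toNat).foldl step2 st := by
  rw [PySem.List.pyRange_one, List.foldl_map]
  have h : (fun (st : List Int × List Int) (k : Nat) => innerBody st ((0:Int) + (k:Int))) = step2 := by
    funext st k; exact step_eq st k
  rw [show M - 0 = M by ring, h]

theorem outer_go : ∀ (c s : Nat) (Z : List (Int × Int)) (n : Nat), Z.length = n → s + c = n - 1 →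
    (List.range' s c).foldl
      (fun st (k : Nat) => (PySem.List.pyRange 0 ((n:Int) - (k:Int) - 1) 1).foldl innerBody st)
      (mstate Z)
    = mstate (bubOuter n c s Z) := by
  intro c
  induction c with
  | zero => intro s Z n _ _; simp [bubOuter]
  | succ c ih =>
    intro s Z n hlen hs
    rw [List.range'_succ, List.foldl_cons, inner_fold_eq]
    have h2 : 2 ≤ n := by omega
    have htn : ((n:Int) - (s:Int) - 1).toNat = n - s - 1 := by omega
    rw [htn, inner_nat_eq (n - s - 1) Z (by omega)]
    rw [bubOuter]
    exact ih (s+1) _ n (by rw [(bpass_perm _ _).length_eq]; exact hlen) (by omega)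

theorem outer_fold_eq (Z : List (Int × Int)) :
    (PySem.List.pyRange 0 ((Z.length : Int) - 1) 1).foldl
      (fun st a => (PySem.List.pyRange 0 ((Z.length : Int) - a - 1) 1).foldl innerBody st) (mstate Z)
    = mstate (bubOuter Z.length (Z.length - 1) 0 Z) := by
  rw [PySem.List.pyRange_one, List.foldl_map, List.range_eq_range']
  have h : (fun (st : List Int × List Int) (k : Nat) =>
      (PySem.List.pyRange 0 ((Z.length:Int) - ((0:Int) + (k:Int)) - 1) 1).foldl innerBody st)
      = (fun st (k : Nat) => (PySem.List.pyRange 0 ((Z.length:Int) - (k:Int) - 1) 1).foldl innerBody st) := by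
    funext st k; rw [zero_add]
  have htn : ((Z.length : Int) - 1 - 0).toNat = Z.length - 1 := by omega
  rw [htn, h]
  exact outer_go (Z.length - 1) 0 Z Z.length rfl (by omega)

theorem classes_transfer (cnt : Int → Int) (l₁ l₂ : List Int) (c : Int)
    (h : (l₁.map (fun v => (v, cnt v))).filter (fun p => p.2 == c)
       = (l₂.map (fun v => (v, cnt v))).filter (fun p => p.2 == c)) :
    l₁.filter (fun v => cnt v == c) = l₂.filter (fun v => cnt v == c) := by
  rw [List.filter_map, List.filter_map] at h
  have h2 := congrArg (List.map Prod.fst) h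
  rw [List.map_map, List.map_map] at h2
  have hpe : ((fun p : Int × Int => p.2 == c) ∘ (fun v => (v, cnt v))) = (fun v => cnt v == c) := by
    funext v; rfl
  have hfe : (Prod.fst ∘ (fun v : Int => (v, cnt v))) = id := by funext v; rfl
  rw [hpe, hfe, List.map_id, List.map_id] at h2
  exact h2

theorem main_eq (keys : List Int) (cnt : Int → Int) :
    mstate (bubOuter keys.length (keys.length - 1) 0 (keys.map (fun v => (v, cnt v)))) =
      (PySem.List.sorted keys (fun v => -(cnt v)) false,
       (PySem.List.sorted keys (fun v => -(cnt v)) false).map cnt) := by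
  set e : Int → Int × Int := fun v => (v, cnt v) with he
  set f : Int → Int := fun v => -(cnt v) with hf
  set Z0 := keys.map e with hZ0
  set Zf := bubOuter keys.length (keys.length - 1) 0 Z0 with hZf
  have hperm : Zf.Perm Z0 := bubOuter_perm _ _ _ _
  have hpw : Zf.Pairwise (fun p q => q.2 ≤ p.2) := by
    apply bubOuter_pairwise keys.length (keys.length - 1) 0 Z0 (by simp [hZ0]) (by omega)
    exact ⟨Z0, [], by simp⟩
  have hfil : ∀ c, Zf.filter (fun p => p.2 == c) = Z0.filter (fun p => p.2 == c) :=
    fun c => bubOuter_filter _ _ _ _ c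
  have hform : Zf = (Zf.map Prod.fst).map e := by
    rw [List.map_map]
    have : ∀ p ∈ Zf, (e ∘ Prod.fst) p = p := by
      intro p hp
      have : p ∈ Z0 := hperm.mem_iff.mp hp
      obtain ⟨v, _, hv⟩ := List.mem_map.mp this
      simp [← hv, he]
    rw [List.map_congr_left this]; simp
  set lA := Zf.map Prod.fst with hlA
  have hkeys1 : Z0.map Prod.fst = keys := by
    rw [hZ0, List.map_map]; simp [he, Function.comp_def]
  have hpermA : lA.Perm keys := by rw [← hkeys1]; exact hperm.map Prod.fst
  have hpwA : lA.Pairwise (fun a b => f a ≤ f b) := by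
    rw [hform] at hpw
    rw [List.pairwise_map] at hpw
    exact hpw.imp (by intro a b h; simp [he, hf] at h ⊢; omega)
  have hfilA : ∀ c, lA.filter (fun v => cnt v == c) = keys.filter (fun v => cnt v == c) := by
    intro c
    refine classes_transfer cnt lA keys c ?_
    rw [show List.map (fun v => (v, cnt v)) lA = List.map e lA from rfl,
        show List.map (fun v => (v, cnt v)) keys = List.map e keys from rfl,
        ← hform, ← hZ0]
    exact hfil c
  have hclass : ∀ (l : List Int) (c : Int),
      l.filter (fun v => f v == c) = l.filter (fun v => cnt v == -c) := by
    intro l c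
    apply List.filter_congr
    intro v _
    simp [hf]
    omega
  have hsp : PySem.List.sorted keys f false = lA := by
    apply uniq_sorted f
    · exact (PySem.List.sorted_perm keys f false).trans hpermA.symm
    · exact PySem.List.sorted_pairwise keys f
    · exact hpwA
    · intro c
      rw [sorted_filter f c keys, hclass _ c, hclass _ c, hfilA (-c)]
  have hsnd : Zf.map Prod.snd = lA.map cnt := by
    rw [hform, List.map_map]
    simp [he, Function.comp]
  rw [hsp]
  simp only [mstate, ← hlA, hsnd]

theorem dedup_fold (l : List Int) : ∀ acc,
    l.foldl (fun l2 item => if item ∈ l2 then l2 else l2 ++ [item]) acc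
      = l.foldl PySem.Set.add acc := by
  induction l with
  | nil => intro acc; rfl
  | cons x t ih =>
    intro acc
    rw [List.foldl_cons, List.foldl_cons, ih]
    congr 1
    simp [PySem.Set.add, PySem.Set.contains, List.contains_eq_mem]

theorem A_eq (lista : List Int) :
    organizar_frequencia lista =
      mstate (bubOuter (PySem.List.dedup (PySem.List.sorted lista (fun x => x) false)).length
        ((PySem.List.dedup (PySem.List.sorted lista (fun x => x) false)).length - 1) 0
        ((PySem.List.dedup (PySem.List.sorted lista (fun x => x) false)).map
          (fun v => (v, (List.count v (PySem.List.sorted lista (fun x => x) false) : Int))))) := by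
  set sl := PySem.List.sorted lista (fun x => x) false with hsl
  set keys := PySem.List.dedup sl with hkeys
  have h1 : sl.foldl (fun l2 item => if item ∈ l2 then l2 else l2 ++ [item]) [] = keys := by
    rw [dedup_fold, hkeys, PySem.List.dedup_eq_ofList, PySem.Set.ofList_eq_foldl]
  have h2 : (PySem.List.pyRange 0 (PySem.List.len keys) 1).foldl
      (fun P c => P ++ [((PySem.List.count sl (PySem.List.pyGetD keys c 0)) : Int)]) []
      = keys.map (fun v => (List.count v sl : Int)) := by
    rw [PySem.List.foldl_append_singleton_eq_map, List.nil_append]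
    simp only [PySem.List.count_eq]
    rw [show (fun c => ((List.count (PySem.List.pyGetD keys c 0) sl : Nat) : Int))
          = (fun v => ((List.count v sl : Nat) : Int)) ∘ (fun c => PySem.List.pyGetD keys c 0) from rfl,
        ← List.map_map]
    simp only [PySem.List.len_eq]
    rw [PySem.List.map_pyGetD_pyRange_zero']
  have hst : ((keys, keys.map (fun v => (List.count v sl : Int))) : List Int × List Int)
      = mstate (keys.map (fun v => (v, (List.count v sl : Int)))) := by
    simp [mstate, List.map_map, Function.comp_def]
  have h3 := outer_fold_eq (keys.map (fun v => (v, (List.count v sl : Int))))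
  rw [List.length_map] at h3
  simp only [organizar_frequencia]
  rw [h1, h2, PySem.List.len_eq, hst]
  exact h3

theorem B_eq (lista : List Int) :
    organizar_frequencia_alt lista =
      (PySem.List.sorted (PySem.List.dedup (PySem.List.sorted lista (fun x => x) false))
         (fun v => -((List.count v (PySem.List.sorted lista (fun x => x) false) : Int))) false,
       (PySem.List.sorted (PySem.List.dedup (PySem.List.sorted lista (fun x => x) false))
         (fun v => -((List.count v (PySem.List.sorted lista (fun x => x) false) : Int))) false).map
         (fun v => (List.count v (PySem.List.sorted lista (fun x => x) false) : Int))) := by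
  simp only [organizar_frequencia_alt]
  rw [PySem.Dict.foldl_insert_getD_add_one_eq_counter]
  simp only [PySem.Dict.getD_counter, PySem.Dict.keys_counter]
  rw [← PySem.List.dedup_eq_ofList]

-- ===== VERDICT (by name: the statement is the Claim_ definition above) =====
theorem organizar_frequencia_spec : Claim_equal_organizar_frequencia := by
  intro lista _
  unfold Spec_organizar_frequencia
  rw [A_eq, B_eq]
  exact main_eq _ _
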